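-- pv_equiv track=rewrite | github.com/CMMRLab/LUNAR | src/bond_react_merge/auto_gen_map_file.py | bfs_neighs_depth
-- ===== SOURCE A (Python) =====
-- def bfs_neighs_depth(atomID, graph):
--     # Use BFS and iterate through all atoms to find neighbors list of lists
--     neighbors = [graph[atomID]]; visited = set(graph[atomID] + [atomID]);
--     for n, neighs in enumerate(neighbors):
--         for neigh in neighs:
--             neighbors.append([]); tmp = [];
--             for adjacent in graph[neigh]:
--                 if adjacent in visited: continue
--                 tmp.append(adjacent)
--                 visited.add(adjacent)
--             neighbors[n+1].extend(tmp)
--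
--     # Reduce neighbors to only neighs without empty lists.
--     reduced = [neighs for neighs in neighbors if neighs != []]
--     return reduced
-- ===== SOURCE B (Python) =====
-- def bfs_neighs_depth(atomID, graph):
--     # Single FIFO queue of (node, depth) pairs; nodes are bucketed per depth
--     # into a dict as they are dequeued, so no level lists are ever indexed,
--     # grown in place or filtered for emptiness.
--     visited = set(graph[atomID] + [atomID])
--     queue = [(node, 1) for node in graph[atomID]]
--     buckets = {}
--     i = 0
--     while i < len(queue):
--         node, depth = queue[i]
--         i += 1
--         buckets.setdefault(depth, []).append(node)
--         for adjacent in graph[node]: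
--             if adjacent not in visited:
--                 visited.add(adjacent)
--                 queue.append((adjacent, depth + 1))
--     return list(buckets.values())
-- ===== Notes on version B (the rewrite author's own statement) =====
-- stated objective: alternative
-- what changed: Replaces A's level-list machinery (a single growing list of lists mutated under enumerate with append-[]/neighbors[n+1].extend index arithmetic and a final empty-list filter) by a flat FIFO queue of (node, depth) pairs walked with an index pointer, bucketing each dequeued node into a depth-keyed dict and returning the dict's values; no level list is ever indexed, grown in place or filtered.
import Mathlib
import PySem

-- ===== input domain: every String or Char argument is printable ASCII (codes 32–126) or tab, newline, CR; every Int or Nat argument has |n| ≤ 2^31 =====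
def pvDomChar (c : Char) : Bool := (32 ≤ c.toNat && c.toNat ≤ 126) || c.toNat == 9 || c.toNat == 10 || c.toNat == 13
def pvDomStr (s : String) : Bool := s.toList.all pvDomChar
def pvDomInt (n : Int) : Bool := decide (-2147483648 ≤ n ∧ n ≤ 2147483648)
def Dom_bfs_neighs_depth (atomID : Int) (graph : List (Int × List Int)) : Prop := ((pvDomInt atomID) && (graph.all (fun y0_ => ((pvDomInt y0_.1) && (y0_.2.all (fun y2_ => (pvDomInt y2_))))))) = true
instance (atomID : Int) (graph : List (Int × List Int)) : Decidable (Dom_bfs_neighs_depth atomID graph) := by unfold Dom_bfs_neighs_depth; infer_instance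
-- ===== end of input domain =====

-- B replaces A's growing index-mutated list of levels (enumerate + neighbors[n+1].extend +
-- final non-empty filter) by a flat FIFO queue of (node, depth) pairs bucketed into a
-- depth-keyed dict; same return value on Pre_.


-- ===== PORT A =====
-- graph[k] (a dict lookup); total via default [] — Pre_ guarantees every performed
-- lookup hits an existing key, where Python would otherwise raise KeyError.
def pvLookup (graph : List (Int × List Int)) (k : Int) : List Int :=
  PySem.Dict.getD (PySem.Dict.mk graph) k []

-- body of A's inner 'for adjacent in graph[neigh]' loop (state = (tmp, visited))
def aAdj (p : List Int × PySem.Set Int) (adjacent : Int) : List Int × PySem.Set Int :=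
  if PySem.Set.contains p.2 adjacent then p
  else (p.1 ++ [adjacent], PySem.Set.add p.2 adjacent)

-- body of A's 'for neigh in neighs' loop: append [], build tmp, extend neighbors[n+1]
def aStep (graph : List (Int × List Int)) (n : Nat)
    (st : List (List Int) × PySem.Set Int) (neigh : Int) :
    List (List Int) × PySem.Set Int :=
  let nb := st.1 ++ [[]]
  let r := (pvLookup graph neigh).foldl aAdj ([], st.2)
  (nb.set (n + 1) (nb.getD (n + 1) [] ++ r.1), r.2)

-- A's 'for n, neighs in enumerate(neighbors)' over the growing list; the fuel is a
-- totality guard only — inside Pre_ it is provably never exhausted.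
def aLoop (graph : List (Int × List Int)) :
    Nat → Nat → List (List Int) × PySem.Set Int → List (List Int)
  | 0, _, st => st.1
  | fuel + 1, n, st =>
    if n < st.1.length then
      aLoop graph fuel (n + 1) ((st.1.getD n []).foldl (aStep graph n) st)
    else st.1

def bfs_neighs_depth (atomID : Int) (graph : List (Int × List Int)) : List (List Int) :=
  let start := pvLookup graph atomID
  (aLoop graph (start.length + (graph.flatMap (fun p => p.2)).length + 2) 0
      ([start], PySem.Set.ofList (start ++ [atomID]))).filter (fun l => decide (l ≠ []))

-- ===== PORT B =====
-- body of B's inner 'for adjacent in graph[node]' loop: discover and enqueue at depth+1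
-- (state = (visited, queue suffix not yet dequeued))
def qAdj (depth : Int) (p : PySem.Set Int × List (Int × Int)) (adjacent : Int) :
    PySem.Set Int × List (Int × Int) :=
  if PySem.Set.contains p.1 adjacent then p
  else (PySem.Set.add p.1 adjacent, p.2 ++ [(adjacent, depth + 1)])

-- B's 'while i < len(queue)' over the flat FIFO queue: the list argument is queue[i:]
-- (the unread suffix; 'i += 1' drops the head, queue.append extends it at the right);
-- each dequeued node is bucketed into the depth-keyed dict (setdefault + append).
-- The fuel is a totality guard only.
def qLoop (g : List (Int × List Int)) :
    Nat → List (Int × Int) → PySem.Set Int → PySem.Dict Int (List Int) →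
    PySem.Dict Int (List Int)
  | 0, _, _, b => b
  | _ + 1, [], _, b => b
  | fuel + 1, (node, depth) :: rest, vis, b =>
      let b' := b.insert depth (b.getD depth [] ++ [node])
      let r := (pvLookup g node).foldl (qAdj depth) (vis, rest)
      qLoop g fuel r.2 r.1 b'

def bfs_neighs_depth_alt (atomID : Int) (graph : List (Int × List Int)) : List (List Int) :=
  let start := pvLookup graph atomID
  PySem.Dict.values
    (qLoop graph (start.length + (graph.flatMap (fun p => p.2)).length + 2)
      (start.map (fun node => (node, (1 : Int))))
      (PySem.Set.ofList (start ++ [atomID])) PySem.Dict.empty)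

-- ===== PRECONDITION & SPEC =====
-- one closure round: add every node adjacent to a current member (non-members of the
-- key set contribute nothing, exactly as a dict lookup on them would raise instead)
def pvReachStep (graph : List (Int × List Int)) (S : PySem.Set Int) : PySem.Set Int :=
  S.foldl (fun T v => PySem.Set.update T (PySem.Dict.getD (PySem.Dict.mk graph) v [])) S

def pvReachIter (graph : List (Int × List Int)) : Nat → PySem.Set Int → PySem.Set Int
  | 0, S => S
  | n + 1, S => pvReachIter graph n (pvReachStep graph S)

-- Python A raises KeyError exactly when some node reachable from atomID through the
-- dict is not a key; Pre_ says the adjacency closure of {atomID} stays inside the key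
-- set (a reachability condition on the input, not a run of either program).
def Pre_bfs_neighs_depth (atomID : Int) (graph : List (Int × List Int)) : Prop :=
  ∀ v ∈ pvReachIter graph (graph.length + 1) (PySem.Set.ofList [atomID]),
    v ∈ graph.map Prod.fst
instance (atomID : Int) (graph : List (Int × List Int)) : Decidable (Pre_bfs_neighs_depth atomID graph) := by
  unfold Pre_bfs_neighs_depth; infer_instance

def pvWitness_bfs_neighs_depth : Int × (List (Int × List Int)) := (1, [(1, [2]), (2, [])])

def Spec_bfs_neighs_depth (atomID : Int) (graph : List (Int × List Int)) (out : List (List Int)) : Prop := out = bfs_neighs_depth_alt atomID graph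
instance (atomID : Int) (graph : List (Int × List Int)) (out : List (List Int)) : Decidable (Spec_bfs_neighs_depth atomID graph out) := by unfold Spec_bfs_neighs_depth; infer_instance

-- ===== CLAIM (what is proved, stated in full; the proofs are below) =====
def Claim_equal_bfs_neighs_depth : Prop := ∀ (atomID : Int) (graph : List (Int × List Int)), Dom_bfs_neighs_depth atomID graph → Pre_bfs_neighs_depth atomID graph → Spec_bfs_neighs_depth atomID graph (bfs_neighs_depth atomID graph)

-- ===== LEMMAS AND PROOFS =====

-- Proof-only intermediate: a frontier-by-frontier level BFS; both ports are proved
-- equal to it (A via the growing-list invariant, B via a queue/dict invariant).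
def bAdj (p : PySem.Set Int × List Int) (adjacent : Int) : PySem.Set Int × List Int :=
  if PySem.Set.contains p.1 adjacent then p
  else (PySem.Set.add p.1 adjacent, p.2 ++ [adjacent])

def bCollect (graph : List (Int × List Int))
    (p : PySem.Set Int × List Int) (node : Int) : PySem.Set Int × List Int :=
  (pvLookup graph node).foldl bAdj p

def bLoop (graph : List (Int × List Int)) :
    Nat → PySem.Set Int → List Int → List (List Int)
  | 0, _, _ => []
  | fuel + 1, visited, current =>
    if current = [] then []
    else
      let r := current.foldl (bCollect graph) (visited, [])
      current :: bLoop graph fuel r.1 r.2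

-- the tmp accumulator of A's inner adjacency fold factors out
lemma aAdj_factor (l : List Int) (t : List Int) (v : PySem.Set Int) :
    l.foldl aAdj (t, v) = (t ++ (l.foldl aAdj ([], v)).1, (l.foldl aAdj ([], v)).2) := by
  induction l generalizing t v with
  | nil => simp
  | cons x l ih =>
    simp only [List.foldl_cons, aAdj]
    by_cases h : PySem.Set.contains v x
    · simp only [h, if_true]
      exact ih t v
    · simp only [h, if_false, Bool.false_eq_true]
      rw [ih (t ++ [x])]
      simp only [List.nil_append]
      rw [ih [x]]
      simp

-- the frontier fold's inner step is A's with the pair swapped and the accumulator appended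
lemma bAdj_swap (l : List Int) (v : PySem.Set Int) (acc : List Int) :
    l.foldl bAdj (v, acc) = ((l.foldl aAdj ([], v)).2, acc ++ (l.foldl aAdj ([], v)).1) := by
  induction l generalizing v acc with
  | nil => simp
  | cons x l ih =>
    simp only [List.foldl_cons, bAdj, aAdj]
    by_cases h : PySem.Set.contains v x
    · simp only [h, if_true]
      exact ih v acc
    · simp only [h, if_false, Bool.false_eq_true]
      rw [ih (PySem.Set.add v x) (acc ++ [x])]
      simp only [List.nil_append]
      rw [aAdj_factor l [x]]
      simp

-- B's inner queue-appending fold is the same adjacency fold with depth tags attached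
lemma qAdj_swap (d : Int) (l : List Int) (v : PySem.Set Int) (q : List (Int × Int)) :
    l.foldl (qAdj d) (v, q)
      = ((l.foldl aAdj ([], v)).2,
         q ++ ((l.foldl aAdj ([], v)).1).map (fun x => (x, d + 1))) := by
  induction l generalizing v q with
  | nil => simp
  | cons x l ih =>
    simp only [List.foldl_cons, qAdj, aAdj]
    by_cases h : PySem.Set.contains v x
    · simp only [h, if_true]
      exact ih v q
    · simp only [h, if_false, Bool.false_eq_true]
      rw [ih (PySem.Set.add v x) (q ++ [(x, d + 1)])]
      simp only [List.nil_append]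
      rw [aAdj_factor l [x]]
      simp

-- the nxt accumulator of the frontier fold factors out
lemma bCollect_factor (g : List (Int × List Int)) (nodes : List Int) (v : PySem.Set Int)
    (acc : List Int) :
    nodes.foldl (bCollect g) (v, acc)
      = ((nodes.foldl (bCollect g) (v, [])).1, acc ++ (nodes.foldl (bCollect g) (v, [])).2) := by
  induction nodes generalizing v acc with
  | nil => simp
  | cons x nodes ih =>
    simp only [List.foldl_cons, bCollect]
    rw [bAdj_swap (pvLookup g x) v acc, bAdj_swap (pvLookup g x) v []]
    simp only [List.nil_append]
    rw [ih ((pvLookup g x).foldl aAdj ([], v)).2 (acc ++ ((pvLookup g x).foldl aAdj ([], v)).1),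
        ih ((pvLookup g x).foldl aAdj ([], v)).2 ((pvLookup g x).foldl aAdj ([], v)).1]
    simp

lemma getD_append_cons {a : Type} (pre : List a) (x : a) (rest : List a) (d : a) :
    (pre ++ x :: rest).getD pre.length d = x := by
  induction pre with
  | nil => simp
  | cons p pre ih => simp

lemma getD_append_cons_succ {a : Type} (pre : List a) (x y : a) (rest : List a) (d : a) :
    (pre ++ x :: y :: rest).getD (pre.length + 1) d = y := by
  induction pre with
  | nil => simp
  | cons p pre ih => simp

lemma set_append_cons_succ {a : Type} (pre : List a) (x y : a) (rest : List a) (c : a) :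
    (pre ++ x :: y :: rest).set (pre.length + 1) c = pre ++ x :: c :: rest := by
  induction pre with
  | nil => simp
  | cons p pre ih => simp

lemma getD_append_replicate_nil (pre : List (List Int)) (m i : Nat) (h : pre.length ≤ i) :
    (pre ++ List.replicate m ([] : List Int)).getD i [] = [] := by
  induction pre generalizing i with
  | nil =>
    simp only [List.nil_append, List.getD, List.getElem?_replicate]
    split <;> rfl
  | cons p pre ih =>
    cases i with
    | zero => simp at h
    | succ j => simpa using ih j (by simpa using h)

-- A's per-level fold, on the list shape it actually sees, computes the frontier collect
lemma inner_shift (g : List (Int × List Int)) (neighs : List Int) (done : List (List Int))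
    (cur acc : List Int) (m : Nat) (vis : PySem.Set Int) :
    neighs.foldl (aStep g done.length) (done ++ cur :: acc :: List.replicate m [], vis)
      = (done ++ cur :: (acc ++ (neighs.foldl (bCollect g) (vis, [])).2)
            :: List.replicate (m + neighs.length) [],
         (neighs.foldl (bCollect g) (vis, [])).1) := by
  induction neighs generalizing acc m vis with
  | nil => simp
  | cons neigh rest ih =>
    simp only [List.foldl_cons, aStep]
    have hnb : (done ++ cur :: acc :: List.replicate m ([] : List Int)) ++ [[]]
        = done ++ cur :: acc :: List.replicate (m + 1) ([] : List Int) := by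
      simp [List.replicate_succ']
    rw [hnb, getD_append_cons_succ, set_append_cons_succ, ih]
    have hb : bCollect g (vis, []) neigh
        = (((pvLookup g neigh).foldl aAdj ([], vis)).2,
           ((pvLookup g neigh).foldl aAdj ([], vis)).1) := by
      simp [bCollect, bAdj_swap]
    rw [hb, bCollect_factor g rest (((pvLookup g neigh).foldl aAdj ([], vis)).2)
          (((pvLookup g neigh).foldl aAdj ([], vis)).1)]
    have hm : m + 1 + rest.length = m + (rest.length + 1) := by omega
    simp [hm, List.append_assoc]

-- once every entry from index n on is empty, A's loop changes nothing
lemma aLoop_noop (g : List (Int × List Int)) (fuel : Nat) :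
    ∀ (n : Nat) (L : List (List Int)) (vis : PySem.Set Int),
    (∀ i, n ≤ i → L.getD i [] = []) → aLoop g fuel n (L, vis) = L := by
  induction fuel with
  | zero => intro n L vis _; rfl
  | succ fuel ih =>
    intro n L vis h
    simp only [aLoop]
    split
    · rw [h n (le_refl n)]
      simp only [List.foldl_nil]
      exact ih (n + 1) L vis (fun i hi => h i (by omega))
    · rfl

-- number of distinct adjacency-list values not yet visited (every node a frontier can
-- still gain is one of them, which bounds the loops' remaining work)
def freshN (g : List (Int × List Int)) (vis : PySem.Set Int) : Nat :=
  ((PySem.List.dedup (g.flatMap (fun p => p.2))).filter (fun y => decide (y ∉ vis))).length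

lemma freshN_le (g : List (Int × List Int)) (vis : PySem.Set Int) :
    freshN g vis ≤ (g.flatMap (fun p => p.2)).length := by
  calc ((PySem.List.dedup (g.flatMap (fun p => p.2))).filter (fun y => decide (y ∉ vis))).length
      ≤ (PySem.List.dedup (g.flatMap (fun p => p.2))).length := List.length_filter_le _ _
    _ ≤ (g.flatMap (fun p => p.2)).length := by
        rw [PySem.List.dedup_eq_ofList]; exact PySem.Set.length_ofList_le _

lemma freshN_add_lt (g : List (Int × List Int)) (vis : PySem.Set Int) (x : Int)
    (hx : x ∈ g.flatMap (fun p => p.2)) (hv : x ∉ vis) :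
    freshN g (PySem.Set.add vis x) < freshN g vis := by
  unfold freshN
  rw [PySem.Set.add_of_not_mem hv]
  have heq : (PySem.List.dedup (g.flatMap (fun p => p.2))).filter (fun y => decide (y ∉ vis ++ [x]))
      = ((PySem.List.dedup (g.flatMap (fun p => p.2))).filter (fun y => decide (y ∉ vis))).filter
          (fun y => decide (y ≠ x)) := by
    rw [List.filter_filter]
    apply List.filter_congr
    intro a _
    by_cases h1 : a ∈ vis <;> by_cases h2 : a = x <;> simp [h1, h2]
  rw [heq]
  apply List.length_filter_lt_length_iff_exists.mpr
  refine ⟨x, ?_, by simp⟩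
  simp [PySem.List.dedup_eq_ofList, PySem.Set.mem_ofList, hx, hv]

-- every adjacency list handed out by pvLookup is one of graph's value lists (or [])
lemma pvLookup_subset (g : List (Int × List Int)) (node : Int) :
    ∀ x ∈ pvLookup g node, x ∈ g.flatMap (fun p => p.2) := by
  have key : ∀ (h : List (Int × List Int)), (∀ p ∈ h, ∀ v ∈ p.2, v ∈ g.flatMap (fun p => p.2)) →
      ∀ x ∈ PySem.Dict.getD (PySem.Dict.mk h) node [], x ∈ g.flatMap (fun p => p.2) := by
    intro h
    induction h with
    | nil => intro _ x hx; simp [PySem.Dict.getD, PySem.Dict.get?] at hx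
    | cons p rest ih =>
      intro hcl x hx
      rw [PySem.Dict.getD_eq_get?_getD, PySem.Dict.get?_mk_cons] at hx
      by_cases he : p.1 == node
      · simp only [he, if_true, Option.getD_some] at hx
        exact hcl p (by simp) x hx
      · simp only [he, if_false, Bool.false_eq_true] at hx
        rw [← PySem.Dict.getD_eq_get?_getD] at hx
        exact ih (fun q hq => hcl q (by simp [hq])) x hx
  exact key g (fun p hp v hv => List.mem_flatMap.mpr ⟨p, hp, hv⟩)

lemma aAdj_bound (g : List (Int × List Int)) (l : List Int)
    (hl : ∀ x ∈ l, x ∈ g.flatMap (fun p => p.2)) :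
    ∀ (t : List Int) (vis : PySem.Set Int),
    freshN g ((l.foldl aAdj (t, vis)).2) + ((l.foldl aAdj (t, vis)).1).length
      ≤ freshN g vis + t.length := by
  revert hl
  induction l with
  | nil => intro hl t vis; simp
  | cons x l ih =>
    intro hl t vis
    simp only [List.foldl_cons, aAdj]
    by_cases h : PySem.Set.contains vis x
    · simp only [h, if_true]
      exact ih (fun y hy => hl y (by simp [hy])) t vis
    · simp only [h, if_false, Bool.false_eq_true]
      have hv : x ∉ vis := by
        intro hmem
        simp [PySem.Set.contains_eq_listContains] at h
        exact h hmem
      have hlt := freshN_add_lt g vis x (hl x (by simp)) hv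
      have := ih (fun y hy => hl y (by simp [hy])) (t ++ [x]) (PySem.Set.add vis x)
      simp only [List.length_append, List.length_cons, List.length_nil] at *
      omega

lemma collect_bound (g : List (Int × List Int)) (nodes : List Int) :
    ∀ (vis : PySem.Set Int) (acc : List Int),
    freshN g ((nodes.foldl (bCollect g) (vis, acc)).1)
        + ((nodes.foldl (bCollect g) (vis, acc)).2).length
      ≤ freshN g vis + acc.length := by
  induction nodes with
  | nil => intro vis acc; simp
  | cons x nodes ih =>
    intro vis acc
    simp only [List.foldl_cons, bCollect]
    rw [bAdj_swap (pvLookup g x) vis acc]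
    have h1 := aAdj_bound g (pvLookup g x) (pvLookup_subset g x) [] vis
    have h2 := ih ((pvLookup g x).foldl aAdj ([], vis)).2
        (acc ++ ((pvLookup g x).foldl aAdj ([], vis)).1)
    simp only [List.length_append, List.length_nil] at *
    omega

-- main invariant for A: its loop from a mid-BFS state, filtered, is the done levels
-- followed by the frontier BFS
lemma aLoop_main (g : List (Int × List Int)) :
    ∀ (fuel k : Nat) (done : List (List Int)) (cur : List Int) (vis : PySem.Set Int),
    (∀ l ∈ done, l ≠ []) →
    1 + k + cur.length + freshN g vis ≤ fuel →
    (aLoop g fuel done.length (done ++ cur :: List.replicate k [], vis)).filter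
        (fun l => decide (l ≠ []))
      = done ++ bLoop g fuel vis cur := by
  intro fuel
  induction fuel with
  | zero => intro k done cur vis _ hfuel; omega
  | succ fuel ih =>
    intro k done cur vis hdone hfuel
    by_cases hcur : cur = []
    · subst hcur
      have hsh : done ++ ([] : List Int) :: List.replicate k ([] : List Int)
          = done ++ List.replicate (k + 1) ([] : List Int) := by
        simp [List.replicate_succ]
      rw [hsh, aLoop_noop g (fuel + 1) done.length _ vis
            (fun i hi => getD_append_replicate_nil done (k + 1) i hi)]
      rw [List.filter_append]
      have h1 : done.filter (fun l => decide (l ≠ [])) = done :=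
        List.filter_eq_self.mpr (fun l hl => by simpa using hdone l hl)
      rw [h1]
      simp [bLoop]
    · simp only [aLoop]
      have hlen : done.length < (done ++ cur :: List.replicate k ([] : List Int)).length := by
        simp
      rw [if_pos hlen]
      have hget : (done ++ cur :: List.replicate k ([] : List Int)).getD done.length [] = cur :=
        getD_append_cons done cur _ []
      rw [hget]
      have hcb := collect_bound g cur vis []
      have hdone' : ∀ l ∈ done ++ [cur], l ≠ [] := by
        intro l hl
        rcases List.mem_append.mp hl with h | h
        · exact hdone l h
        · simp at h; simpa [h] using hcur
      have hblooprhs : bLoop g (fuel + 1) vis cur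
          = cur :: bLoop g fuel (cur.foldl (bCollect g) (vis, [])).1
              (cur.foldl (bCollect g) (vis, [])).2 := by
        simp only [bLoop]
        rw [if_neg hcur]
      cases k with
      | zero =>
        obtain ⟨c0, rest, rfl⟩ : ∃ c0 rest, cur = c0 :: rest := by
          cases cur with
          | nil => exact absurd rfl hcur
          | cons a b => exact ⟨a, b, rfl⟩
        simp only [List.foldl_cons, aStep]
        have hnb : (done ++ (c0 :: rest) :: List.replicate 0 ([] : List Int)) ++ [[]]
            = done ++ (c0 :: rest) :: ([] : List Int) :: List.replicate 0 ([] : List Int) := by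
          simp
        rw [hnb, getD_append_cons_succ, set_append_cons_succ,
            inner_shift g rest done (c0 :: rest) _ 0 _]
        have hb : bCollect g (vis, []) c0
            = (((pvLookup g c0).foldl aAdj ([], vis)).2,
               ((pvLookup g c0).foldl aAdj ([], vis)).1) := by
          simp [bCollect, bAdj_swap]
        have hr : (c0 :: rest).foldl (bCollect g) (vis, [])
            = ((rest.foldl (bCollect g) ((((pvLookup g c0).foldl aAdj ([], vis)).2), [])).1,
               ((pvLookup g c0).foldl aAdj ([], vis)).1
                 ++ (rest.foldl (bCollect g) ((((pvLookup g c0).foldl aAdj ([], vis)).2), [])).2) := by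
          rw [List.foldl_cons, hb,
              bCollect_factor g rest (((pvLookup g c0).foldl aAdj ([], vis)).2)
                (((pvLookup g c0).foldl aAdj ([], vis)).1)]
        have hshape : done ++ (c0 :: rest)
              :: (([] : List Int) ++ ((pvLookup g c0).foldl aAdj ([], vis)).1
                  ++ (rest.foldl (bCollect g)
                        ((((pvLookup g c0).foldl aAdj ([], vis)).2), [])).2)
              :: List.replicate (0 + rest.length) ([] : List Int)
            = (done ++ [c0 :: rest])
                ++ ((c0 :: rest).foldl (bCollect g) (vis, [])).2
                  :: List.replicate rest.length ([] : List Int) := by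
          rw [hr]
          simp
        rw [hshape]
        have hvis1 : (rest.foldl (bCollect g)
              ((((pvLookup g c0).foldl aAdj ([], vis)).2), [])).1
            = ((c0 :: rest).foldl (bCollect g) (vis, [])).1 := by rw [hr]
        rw [hvis1]
        have hlen2 : done.length + 1 = (done ++ [c0 :: rest]).length := by simp
        rw [hlen2, ih rest.length (done ++ [c0 :: rest])
              ((c0 :: rest).foldl (bCollect g) (vis, [])).2
              (((c0 :: rest).foldl (bCollect g) (vis, []))).1 hdone'
              (by
                simp only [List.length_nil] at hcb
                simp only [List.length_cons] at hfuel
                omega)]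
        rw [hblooprhs]
        simp
      | succ k' =>
        have hsh : done ++ (cur :: List.replicate (k' + 1) ([] : List Int))
            = done ++ cur :: ([] : List Int) :: List.replicate k' ([] : List Int) := by
          simp [List.replicate_succ]
        rw [hsh, inner_shift g cur done cur [] k' vis]
        have hshape : done ++ cur
              :: (([] : List Int) ++ (cur.foldl (bCollect g) (vis, [])).2)
              :: List.replicate (k' + cur.length) ([] : List Int)
            = (done ++ [cur])
                ++ (cur.foldl (bCollect g) (vis, [])).2
                  :: List.replicate (k' + cur.length) ([] : List Int) := by
          simp
        rw [hshape]
        have hlen2 : done.length + 1 = (done ++ [cur]).length := by simp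
        rw [hlen2, ih (k' + cur.length) (done ++ [cur])
              (cur.foldl (bCollect g) (vis, [])).2
              (cur.foldl (bCollect g) (vis, [])).1 hdone'
              (by
                simp only [List.length_nil] at hcb
                omega)]
        rw [hblooprhs]
        simp

-- ===== B-side lemmas: the queue/dict loop also computes the frontier BFS =====

lemma bLoop_nil (g : List (Int × List Int)) (f : Nat) (vis : PySem.Set Int) :
    bLoop g f vis [] = [] := by
  cases f <;> simp [bLoop]

-- with enough fuel, bLoop does not depend on the exact fuel
lemma bLoop_fuel (g : List (Int × List Int)) :
    ∀ (f1 f2 : Nat) (vis : PySem.Set Int) (cur : List Int),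
    freshN g vis + 1 ≤ f1 → freshN g vis + 1 ≤ f2 →
    bLoop g f1 vis cur = bLoop g f2 vis cur := by
  intro f1
  induction f1 with
  | zero => intro f2 vis cur h1 _; omega
  | succ f ih =>
    intro f2 vis cur h1 h2
    cases f2 with
    | zero => omega
    | succ f2' =>
      by_cases hcur : cur = []
      · simp [hcur, bLoop]
      · simp only [bLoop, if_neg hcur]
        have hcb := collect_bound g cur vis []
        simp only [List.length_nil] at hcb
        by_cases hn : (cur.foldl (bCollect g) (vis, [])).2 = []
        · rw [hn, bLoop_nil, bLoop_nil]
        · have hlen : 0 < ((cur.foldl (bCollect g) (vis, [])).2).length :=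
            List.length_pos_iff.mpr hn
          have := ih f2' (cur.foldl (bCollect g) (vis, [])).1
              (cur.foldl (bCollect g) (vis, [])).2 (by omega) (by omega)
          rw [this]

-- dict facts on the concrete association lists the queue loop builds
lemma dict_getD_mk_last (prev : List (Int × List Int)) (d : Int) (par : List Int)
    (h : ∀ k ∈ prev.map Prod.fst, k ≠ d) :
    (PySem.Dict.mk (prev ++ [(d, par)])).getD d [] = par := by
  induction prev with
  | nil => simp [PySem.Dict.getD_eq_get?_getD, PySem.Dict.get?_mk_cons]
  | cons p prev ih =>
    rw [List.cons_append, PySem.Dict.getD_eq_get?_getD, PySem.Dict.get?_mk_cons]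
    have hp : (p.1 == d) = false := by
      simp only [beq_eq_false_iff_ne]
      exact h p.1 (by simp)
    rw [hp]
    simp only [if_false, Bool.false_eq_true]
    rw [← PySem.Dict.getD_eq_get?_getD]
    exact ih (fun k hk => h k (by simp [hk]))

lemma dict_getD_mk_absent (L : List (Int × List Int)) (k : Int)
    (h : ∀ k' ∈ L.map Prod.fst, k' ≠ k) :
    (PySem.Dict.mk L).getD k [] = [] := by
  induction L with
  | nil => simp [PySem.Dict.getD_eq_get?_getD, PySem.Dict.get?]
  | cons p L ih =>
    rw [PySem.Dict.getD_eq_get?_getD, PySem.Dict.get?_mk_cons]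
    have hp : (p.1 == k) = false := by
      simp only [beq_eq_false_iff_ne]
      exact h p.1 (by simp)
    rw [hp]
    simp only [if_false, Bool.false_eq_true]
    rw [← PySem.Dict.getD_eq_get?_getD]
    exact ih (fun k' hk => h k' (by simp [hk]))

lemma dict_contains_mk_absent (L : List (Int × List Int)) (k : Int)
    (h : ∀ k' ∈ L.map Prod.fst, k' ≠ k) :
    (PySem.Dict.mk L).contains k = false := by
  rw [PySem.Dict.contains_eq_decide_mem_keys]
  simp only [decide_eq_false_iff_not]
  intro hk
  exact h k hk rfl

lemma dict_insert_mk_absent (L : List (Int × List Int)) (k : Int) (v : List Int)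
    (h : ∀ k' ∈ L.map Prod.fst, k' ≠ k) :
    (PySem.Dict.mk L).insert k v = PySem.Dict.mk (L ++ [(k, v)]) := by
  apply PySem.Dict.ext
  rw [PySem.Dict.items_insert_of_not_contains _ _ (dict_contains_mk_absent L k h)]

lemma map_replace_noop (L : List (Int × List Int)) (d : Int) (v : List Int)
    (h : ∀ k ∈ L.map Prod.fst, k ≠ d) :
    L.map (fun p => if (p.1 == d) = true then (d, v) else p) = L := by
  induction L with
  | nil => rfl
  | cons p ps ihp =>
    have hpd : (p.1 == d) = false := by
      simp only [beq_eq_false_iff_ne]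
      exact h p.1 (by simp)
    simp only [List.map_cons, hpd, if_false, Bool.false_eq_true]
    rw [ihp (fun k hk => h k (by simp [hk]))]

lemma dict_insert_mk_last (prev : List (Int × List Int)) (d : Int) (par v : List Int)
    (h : ∀ k ∈ prev.map Prod.fst, k ≠ d) :
    (PySem.Dict.mk (prev ++ [(d, par)])).insert d v = PySem.Dict.mk (prev ++ [(d, v)]) := by
  apply PySem.Dict.ext
  have hc : (PySem.Dict.mk (prev ++ [(d, par)])).contains d = true := by
    rw [PySem.Dict.contains_eq_decide_mem_keys]
    simp [PySem.Dict.keys]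
  rw [PySem.Dict.items_insert_of_contains _ _ hc]
  show List.map _ (prev ++ [(d, par)]) = prev ++ [(d, v)]
  rw [List.map_append, map_replace_noop prev d v h]
  simp

-- main invariant for B: the queue loop from a mid-BFS state computes the done buckets
-- followed by the frontier BFS of the remaining queue
lemma qLoop_main (g : List (Int × List Int)) :
    ∀ (fuel : Nat) (d : Int) (cur nxt : List Int) (vis : PySem.Set Int)
      (prev : List (Int × List Int)) (par : List Int),
    (∀ k ∈ prev.map Prod.fst, k < d) →
    cur.length + nxt.length + freshN g vis + 1 ≤ fuel →
    PySem.Dict.values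
        (qLoop g fuel (cur.map (fun x => (x, d)) ++ nxt.map (fun x => (x, d + 1))) vis
          (PySem.Dict.mk (prev ++ [(d, par)])))
      = prev.map Prod.snd
          ++ (par ++ cur)
            :: bLoop g fuel ((cur.foldl (bCollect g) (vis, nxt)).1)
                ((cur.foldl (bCollect g) (vis, nxt)).2) := by
  intro fuel
  induction fuel with
  | zero => intro d cur nxt vis prev par _ hfuel; omega
  | succ fuel ih =>
    intro d cur nxt vis prev par hlt hfuel
    cases cur with
    | nil =>
      cases nxt with
      | nil =>
        simp only [List.map_nil, List.nil_append, qLoop, List.foldl_nil, bLoop_nil]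
        simp [PySem.Dict.values]
      | cons n0 nrest =>
        simp only [List.map_nil, List.nil_append, List.map_cons, List.foldl_nil]
        simp only [qLoop]
        have habs : ∀ k' ∈ (prev ++ [(d, par)]).map Prod.fst, k' ≠ d + 1 := by
          intro k' hk
          rw [List.map_append] at hk
          rcases List.mem_append.mp hk with h | h
          · have := hlt k' h; omega
          · simp at h; omega
        rw [dict_getD_mk_absent _ _ habs, dict_insert_mk_absent _ _ _ habs]
        rw [qAdj_swap]
        simp only [List.nil_append]
        have hfold0 : bCollect g (vis, []) n0
            = (((pvLookup g n0).foldl aAdj ([], vis)).2,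
               ((pvLookup g n0).foldl aAdj ([], vis)).1) := by
          simp [bCollect, bAdj_swap]
        have hbnd := aAdj_bound g (pvLookup g n0) (pvLookup_subset g n0) [] vis
        simp only [List.length_nil] at hbnd
        have hmap : nrest.map (fun x => (x, d + 1))
              ++ (((pvLookup g n0).foldl aAdj ([], vis)).1).map (fun x => (x, d + 1 + 1))
            = nrest.map (fun x => (x, d + 1))
              ++ (((pvLookup g n0).foldl aAdj ([], vis)).1).map (fun x => (x, (d + 1) + 1)) := rfl
        have := ih (d + 1) nrest ((pvLookup g n0).foldl aAdj ([], vis)).1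
            (((pvLookup g n0).foldl aAdj ([], vis)).2)
            (prev ++ [(d, par)]) [n0]
            (by
              intro k hk
              rw [List.map_append] at hk
              rcases List.mem_append.mp hk with h | h
              · have := hlt k h; omega
              · simp at h; omega)
            (by
              simp only [List.length_cons] at hfuel
              omega)
        rw [this]
        have hS : nrest.foldl (bCollect g)
              ((((pvLookup g n0).foldl aAdj ([], vis)).2),
               ((pvLookup g n0).foldl aAdj ([], vis)).1)
            = (n0 :: nrest).foldl (bCollect g) (vis, []) := by
          rw [List.foldl_cons, hfold0]
        rw [hS]
        have hbl : bLoop g (fuel + 1) vis (n0 :: nrest)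
            = (n0 :: nrest)
                :: bLoop g fuel ((n0 :: nrest).foldl (bCollect g) (vis, [])).1
                    ((n0 :: nrest).foldl (bCollect g) (vis, [])).2 := by
          simp only [bLoop]
          rw [if_neg (by simp)]
        rw [hbl]
        simp
    | cons c0 crest =>
      simp only [List.map_cons, List.cons_append]
      simp only [qLoop]
      have hne : ∀ k ∈ prev.map Prod.fst, k ≠ d := fun k hk => by have := hlt k hk; omega
      rw [dict_getD_mk_last prev d par hne, dict_insert_mk_last prev d par _ hne]
      rw [qAdj_swap]
      simp only []
      have hbnd := aAdj_bound g (pvLookup g c0) (pvLookup_subset g c0) [] vis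
      simp only [List.length_nil] at hbnd
      have hre : (crest.map (fun x => (x, d)) ++ nxt.map (fun x => (x, d + 1)))
            ++ (((pvLookup g c0).foldl aAdj ([], vis)).1).map (fun x => (x, d + 1))
          = crest.map (fun x => (x, d))
            ++ (nxt ++ ((pvLookup g c0).foldl aAdj ([], vis)).1).map (fun x => (x, d + 1)) := by
        rw [List.map_append, List.append_assoc]
      rw [hre]
      have := ih d crest (nxt ++ ((pvLookup g c0).foldl aAdj ([], vis)).1)
          (((pvLookup g c0).foldl aAdj ([], vis)).2) prev (par ++ [c0]) hlt
          (by
            simp only [List.length_cons] at hfuel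
            simp only [List.length_append]
            omega)
      rw [this]
      have hfold0 : bCollect g (vis, nxt) c0
          = (((pvLookup g c0).foldl aAdj ([], vis)).2,
             nxt ++ ((pvLookup g c0).foldl aAdj ([], vis)).1) := by
        simp [bCollect, bAdj_swap]
      have hS : crest.foldl (bCollect g)
            ((((pvLookup g c0).foldl aAdj ([], vis)).2),
             nxt ++ ((pvLookup g c0).foldl aAdj ([], vis)).1)
          = (c0 :: crest).foldl (bCollect g) (vis, nxt) := by
        rw [List.foldl_cons, hfold0]
      rw [hS]
      have hcb := collect_bound g (c0 :: crest) vis nxt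
      have hfe : bLoop g fuel ((c0 :: crest).foldl (bCollect g) (vis, nxt)).1
            ((c0 :: crest).foldl (bCollect g) (vis, nxt)).2
          = bLoop g (fuel + 1) ((c0 :: crest).foldl (bCollect g) (vis, nxt)).1
              ((c0 :: crest).foldl (bCollect g) (vis, nxt)).2 := by
        apply bLoop_fuel
        · simp only [List.length_cons] at hfuel
          omega
        · simp only [List.length_cons] at hfuel
          omega
      rw [hfe]
      simp

-- ===== VERDICT (by name: the statement is the Claim_ definition above) =====
theorem bfs_neighs_depth_spec : Claim_equal_bfs_neighs_depth := by
  intro atomID graph _hdom _hpre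
  unfold Spec_bfs_neighs_depth bfs_neighs_depth bfs_neighs_depth_alt
  have hA := aLoop_main graph
      ((pvLookup graph atomID).length + (graph.flatMap (fun p => p.2)).length + 2) 0
      [] (pvLookup graph atomID)
      (PySem.Set.ofList (pvLookup graph atomID ++ [atomID]))
      (by simp)
      (by have := freshN_le graph (PySem.Set.ofList (pvLookup graph atomID ++ [atomID])); omega)
  simp only [List.nil_append, List.length_nil, List.replicate_zero] at hA
  cases hstart : pvLookup graph atomID with
  | nil =>
    rw [hstart] at hA
    simp only [List.map_nil]
    rw [hA, bLoop_nil]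
    simp [qLoop, PySem.Dict.values, PySem.Dict.empty]
  | cons c0 rest =>
    rw [hstart] at hA
    rw [hA]
    simp only [List.map_cons, List.length_cons]
    simp only [qLoop]
    have hins : (PySem.Dict.empty : PySem.Dict Int (List Int)).insert 1
          ((PySem.Dict.empty : PySem.Dict Int (List Int)).getD 1 [] ++ [c0])
        = PySem.Dict.mk ([] ++ [((1 : Int), [c0])]) := by
      rfl
    rw [hins, qAdj_swap]
    simp only [List.nil_append]
    have hbnd := aAdj_bound graph (pvLookup graph c0) (pvLookup_subset graph c0) []
        (PySem.Set.ofList ((c0 :: rest) ++ [atomID]))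
    simp only [List.length_nil] at hbnd
    have hfle := freshN_le graph (PySem.Set.ofList ((c0 :: rest) ++ [atomID]))
    have hQ := qLoop_main graph
        (rest.length + (graph.flatMap (fun p => p.2)).length + 2) 1 rest
        ((pvLookup graph c0).foldl aAdj ([],
            PySem.Set.ofList ((c0 :: rest) ++ [atomID]))).1
        ((pvLookup graph c0).foldl aAdj ([],
            PySem.Set.ofList ((c0 :: rest) ++ [atomID]))).2
        [] [c0]
        (by simp)
        (by omega)
    simp only [List.nil_append, List.map_nil] at hQ
    have harith : rest.length + 1 + (graph.flatMap (fun p => p.2)).length + 2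
        = (rest.length + (graph.flatMap (fun p => p.2)).length + 2) + 1 := by omega
    have harith2 : rest.length + 1 + (graph.flatMap (fun p => p.2)).length + 1
        = rest.length + (graph.flatMap (fun p => p.2)).length + 2 := by omega
    rw [harith, harith2, hQ]
    have hfold0 : bCollect graph (PySem.Set.ofList ((c0 :: rest) ++ [atomID]), []) c0
        = (((pvLookup graph c0).foldl aAdj ([],
              PySem.Set.ofList ((c0 :: rest) ++ [atomID]))).2,
           ((pvLookup graph c0).foldl aAdj ([],
              PySem.Set.ofList ((c0 :: rest) ++ [atomID]))).1) := by
      simp [bCollect, bAdj_swap]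
    have hS : rest.foldl (bCollect graph)
          ((((pvLookup graph c0).foldl aAdj ([],
              PySem.Set.ofList ((c0 :: rest) ++ [atomID]))).2),
           ((pvLookup graph c0).foldl aAdj ([],
              PySem.Set.ofList ((c0 :: rest) ++ [atomID]))).1)
        = (c0 :: rest).foldl (bCollect graph)
            (PySem.Set.ofList ((c0 :: rest) ++ [atomID]), []) := by
      rw [List.foldl_cons, hfold0]
    rw [hS]
    have hbl : bLoop graph ((rest.length + (graph.flatMap (fun p => p.2)).length + 2) + 1)
          (PySem.Set.ofList ((c0 :: rest) ++ [atomID])) (c0 :: rest)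
        = (c0 :: rest)
            :: bLoop graph (rest.length + (graph.flatMap (fun p => p.2)).length + 2)
                ((c0 :: rest).foldl (bCollect graph)
                  (PySem.Set.ofList ((c0 :: rest) ++ [atomID]), [])).1
                ((c0 :: rest).foldl (bCollect graph)
                  (PySem.Set.ofList ((c0 :: rest) ++ [atomID]), [])).2 := by
      simp only [bLoop]
      rw [if_neg (by simp)]
    rw [hbl]
    simp
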